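-- pv_equiv track=rewrite | github.com/literit/Dell-ACL-Generator | ACL-Gen.py | varlist
-- ===== SOURCE A (Python) =====
-- def varlist(input):
--     variables = {}
--     state = 0
--     for x in input:
--         if x == "":
--             state = 0
--         elif state == 0:
--             if x.startswith("define "):
--                 name = x.split("define ")[1]
--                 state = 1
--                 variables[name] = []
--             elif x.startswith("Define "):
--                 name = x.split("Define ")[1]
--                 state = 1
--                 variables[name] = []
--         elif state == 1:
--             variables[name].append(x)
--     return variables
-- ===== SOURCE B (Python) =====
-- def _blocks(lines):
--     """Split lines into maximal runs of consecutive non-empty lines."""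
--     block = []
--     for x in lines:
--         if x == "":
--             if block:
--                 yield block
--             block = []
--         else:
--             block.append(x)
--     if block:
--         yield block
--
--
-- def varlist(input):
--     variables = {}
--     for block in _blocks(input):
--         for i, x in enumerate(block):
--             if x.startswith("define "):
--                 variables[x.split("define ")[1]] = block[i + 1:]
--                 break
--             if x.startswith("Define "):
--                 variables[x.split("Define ")[1]] = block[i + 1:]
--                 break
--     return variables
-- ===== Notes on version B (the rewrite author's own statement) =====
-- stated objective: alternative
-- what changed: Replaced A's one-pass two-state machine (state flag plus a mutable current name) with a grouping decomposition: split the input into blocks of consecutive non-empty lines, then for each block find the first 'define '/'Define ' header and bind the remaining lines of the block at once, instead of appending line by line.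
import Mathlib
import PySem

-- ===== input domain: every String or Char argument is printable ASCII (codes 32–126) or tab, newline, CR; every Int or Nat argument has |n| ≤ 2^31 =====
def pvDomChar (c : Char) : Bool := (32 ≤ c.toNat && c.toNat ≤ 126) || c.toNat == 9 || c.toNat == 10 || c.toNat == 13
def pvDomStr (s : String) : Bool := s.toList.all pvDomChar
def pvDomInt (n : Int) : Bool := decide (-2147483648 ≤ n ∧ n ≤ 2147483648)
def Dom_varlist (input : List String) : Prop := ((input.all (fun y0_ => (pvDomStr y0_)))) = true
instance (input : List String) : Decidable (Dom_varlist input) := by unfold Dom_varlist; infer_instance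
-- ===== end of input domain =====

-- B replaces A's two-state machine (state flag + current name) by a grouping
-- decomposition: blocks of consecutive non-empty lines, then a header search
-- and one tail slice per block; same O(n) cost, alternative structure.

-- ===== PORT A =====
/-- `x.split(sep)[1]` — the index exists whenever `x` starts with the non-empty `sep`. -/
def varlistA.name (x sep : String) : String :=
  (PySem.List.pyGet? ((PySem.Str.split? x sep).getD []) 1).getD ""

/-- one iteration of A's `for x in input` loop; state tuple is (variables, state, name). -/
def varlistA.step (st : PySem.Dict String (List String) × Int × String) (x : String) :
    PySem.Dict String (List String) × Int × String :=
  match st with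
  | (vars, state, name) =>
    if x = "" then (vars, 0, name)
    else if state = 0 then
      if PySem.Str.startswith x "define " then
        (vars.insert (varlistA.name x "define ") [], 1, varlistA.name x "define ")
      else if PySem.Str.startswith x "Define " then
        (vars.insert (varlistA.name x "Define ") [], 1, varlistA.name x "Define ")
      else (vars, 0, name)
    else if state = 1 then
      (vars.modify name [] (· ++ [x]), 1, name)
    else (vars, state, name)

def varlist (input : List String) : List (String × List String) :=
  (input.foldl varlistA.step (PySem.Dict.empty, 0, "")).1.items

-- ===== PORT B =====
/-- `x.split(sep)[1]` — the index exists whenever `x` starts with the non-empty `sep`. -/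
def varlistB.name (x sep : String) : String :=
  (PySem.List.pyGet? ((PySem.Str.split? x sep).getD []) 1).getD ""

/-- Source B's inner `for i, x in enumerate(block)` search: the first define header
and the block's lines after it (`block[i+1:]`). -/
def varlistB.header : List String → Option (String × List String)
  | [] => none
  | x :: rest =>
    if PySem.Str.startswith x "define " then some (varlistB.name x "define ", rest)
    else if PySem.Str.startswith x "Define " then some (varlistB.name x "Define ", rest)
    else varlistB.header rest

/-- Source B's `_blocks`: maximal runs of consecutive non-empty lines. -/
def varlistB.blocks : List String → List (List String)
  | [] => []
  | x :: xs =>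
    if x = "" then varlistB.blocks xs
    else (x :: xs.takeWhile (· ≠ "")) :: varlistB.blocks (xs.dropWhile (· ≠ ""))
termination_by l => l.length
decreasing_by
  · simp
  · have := List.length_dropWhile_le (fun y => decide (y ≠ "")) xs
    simp only [List.length_cons]; omega

def varlistB.procBlock (d : PySem.Dict String (List String)) (b : List String) :
    PySem.Dict String (List String) :=
  match varlistB.header b with
  | none => d
  | some (n, rest) => d.insert n rest

def varlist_alt (input : List String) : List (String × List String) :=
  ((varlistB.blocks input).foldl varlistB.procBlock PySem.Dict.empty).items

-- ===== PRECONDITION & SPEC =====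
def Spec_varlist (input : List String) (out : List (String × List String)) : Prop := out = varlist_alt input
instance (input : List String) (out : List (String × List String)) : Decidable (Spec_varlist input out) := by unfold Spec_varlist; infer_instance

-- ===== CLAIM (what is proved, stated in full; the proofs are below) =====
def Claim_equal_varlist : Prop := ∀ (input : List String), Dom_varlist input → Spec_varlist input (varlist input)

-- ===== LEMMAS AND PROOFS =====

theorem varlistB.blocks_nil : varlistB.blocks [] = [] := by
  rw [varlistB.blocks]

theorem varlistB.blocks_empty_cons (xs : List String) :
    varlistB.blocks ("" :: xs) = varlistB.blocks xs := by
  rw [varlistB.blocks, if_pos rfl]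

theorem varlistB.blocks_cons {x : String} (xs : List String) (hx : x ≠ "") :
    varlistB.blocks (x :: xs)
      = (x :: xs.takeWhile (· ≠ "")) :: varlistB.blocks (xs.dropWhile (· ≠ "")) := by
  rw [varlistB.blocks, if_neg hx]

theorem varlistA.step_empty (d : PySem.Dict String (List String)) (s : Int) (n : String) :
    varlistA.step (d, s, n) "" = (d, 0, n) := by
  simp [varlistA.step]

theorem varlistA.step_skip (d : PySem.Dict String (List String)) (n x : String)
    (hx : x ≠ "")
    (h1 : ¬ PySem.Str.startswith x "define " = true)
    (h2 : ¬ PySem.Str.startswith x "Define " = true) :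
    varlistA.step (d, 0, n) x = (d, 0, n) := by
  simp only [varlistA.step]
  rw [if_neg hx]; simp only [if_true]; rw [if_neg h1, if_neg h2]

theorem varlistA.step_define (d : PySem.Dict String (List String)) (n x : String)
    (hx : x ≠ "") (h1 : PySem.Str.startswith x "define " = true) :
    varlistA.step (d, 0, n) x
      = (d.insert (varlistA.name x "define ") [], 1, varlistA.name x "define ") := by
  simp only [varlistA.step]
  rw [if_neg hx]; simp only [if_true]; rw [if_pos h1]

theorem varlistA.step_Define (d : PySem.Dict String (List String)) (n x : String)
    (hx : x ≠ "")
    (h1 : ¬ PySem.Str.startswith x "define " = true)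
    (h2 : PySem.Str.startswith x "Define " = true) :
    varlistA.step (d, 0, n) x
      = (d.insert (varlistA.name x "Define ") [], 1, varlistA.name x "Define ") := by
  simp only [varlistA.step]
  rw [if_neg hx]; simp only [if_true]; rw [if_neg h1, if_pos h2]

theorem varlistA.step_append (d : PySem.Dict String (List String))
    (nm : String) (acc : List String) (x : String) (hx : x ≠ "") :
    varlistA.step (d.insert nm acc, 1, nm) x = (d.insert nm (acc ++ [x]), 1, nm) := by
  simp only [varlistA.step]
  rw [if_neg hx]; simp only [if_true]
  rw [show (d.insert nm acc).modify nm [] (· ++ [x])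
        = (d.insert nm acc).insert nm (((d.insert nm acc).getD nm []) ++ [x]) from rfl,
    PySem.Dict.getD_insert_self, PySem.Dict.insert_insert_self,
    if_neg (by norm_num : ¬ (1 : Int) = 0)]

theorem varlistB.procBlock_nil (d : PySem.Dict String (List String)) :
    varlistB.procBlock d [] = d := rfl

theorem varlistB.procBlock_skip (d : PySem.Dict String (List String)) (x : String)
    (b : List String)
    (h1 : ¬ PySem.Str.startswith x "define " = true)
    (h2 : ¬ PySem.Str.startswith x "Define " = true) :
    varlistB.procBlock d (x :: b) = varlistB.procBlock d b := by
  simp only [varlistB.procBlock, varlistB.header]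
  rw [if_neg h1, if_neg h2]

theorem varlistB.procBlock_define (d : PySem.Dict String (List String)) (x : String)
    (b : List String) (h1 : PySem.Str.startswith x "define " = true) :
    varlistB.procBlock d (x :: b) = d.insert (varlistA.name x "define ") b := by
  simp only [varlistB.procBlock, varlistB.header]
  rw [if_pos h1]; rfl

theorem varlistB.procBlock_Define (d : PySem.Dict String (List String)) (x : String)
    (b : List String)
    (h1 : ¬ PySem.Str.startswith x "define " = true)
    (h2 : PySem.Str.startswith x "Define " = true) :
    varlistB.procBlock d (x :: b) = d.insert (varlistA.name x "Define ") b := by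
  simp only [varlistB.procBlock, varlistB.header]
  rw [if_neg h1, if_pos h2]; rfl

/-- Main invariant, both loop states at once: from state 0 A processes exactly B's
blocks; from state 1 on key `nm` it extends `d[nm]` by the current run and resumes. -/
theorem varlist_main (N : Nat) : ∀ (ys : List String), ys.length ≤ N →
    (∀ (d : PySem.Dict String (List String)) (n : String),
      (ys.foldl varlistA.step (d, 0, n)).1
        = (varlistB.blocks ys).foldl varlistB.procBlock d) ∧
    (∀ (d : PySem.Dict String (List String)) (acc : List String) (nm : String),
      (ys.foldl varlistA.step (d.insert nm acc, 1, nm)).1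
        = (varlistB.blocks (ys.dropWhile (· ≠ ""))).foldl varlistB.procBlock
            (d.insert nm (acc ++ ys.takeWhile (· ≠ "")))) := by
  induction N with
  | zero =>
    intro ys hlen
    have hys : ys = [] := List.length_eq_zero_iff.mp (Nat.le_zero.mp hlen)
    subst hys
    exact ⟨fun d n => by simp [varlistB.blocks_nil],
           fun d acc nm => by simp [varlistB.blocks_nil]⟩
  | succ N ih =>
    intro ys hlen
    match ys with
    | [] =>
      exact ⟨fun d n => by simp [varlistB.blocks_nil],
             fun d acc nm => by simp [varlistB.blocks_nil]⟩
    | x :: xs =>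
      have hxs : xs.length ≤ N := by simpa using hlen
      constructor
      · -- state 0
        intro d n
        by_cases hx : x = ""
        · subst hx
          rw [List.foldl_cons, varlistA.step_empty, varlistB.blocks_empty_cons]
          exact (ih xs hxs).1 d n
        · by_cases hd1 : PySem.Str.startswith x "define " = true
          · rw [List.foldl_cons, varlistA.step_define d n x hx hd1,
              (ih xs hxs).2 d [] (varlistA.name x "define "),
              varlistB.blocks_cons xs hx, List.foldl_cons,
              varlistB.procBlock_define d x _ hd1, List.nil_append]
          · by_cases hd2 : PySem.Str.startswith x "Define " = true
            · rw [List.foldl_cons, varlistA.step_Define d n x hx hd1 hd2,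
                (ih xs hxs).2 d [] (varlistA.name x "Define "),
                varlistB.blocks_cons xs hx, List.foldl_cons,
                varlistB.procBlock_Define d x _ hd1 hd2, List.nil_append]
            · rw [List.foldl_cons, varlistA.step_skip d n x hx hd1 hd2,
                (ih xs hxs).1 d n, varlistB.blocks_cons xs hx, List.foldl_cons,
                varlistB.procBlock_skip d x _ hd1 hd2]
              -- both sides now process the same first run; split on how xs starts
              match xs with
              | [] => rw [List.takeWhile_nil, List.dropWhile_nil,
                  varlistB.procBlock_nil, varlistB.blocks_nil]
              | y :: xs' =>
                by_cases hy : y = ""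
                · subst hy
                  rw [List.takeWhile_cons_of_neg (by simp),
                    List.dropWhile_cons_of_neg (by simp),
                    varlistB.procBlock_nil, varlistB.blocks_empty_cons]
                · rw [List.takeWhile_cons_of_pos (by simp [hy]),
                    List.dropWhile_cons_of_pos (by simp [hy]),
                    varlistB.blocks_cons xs' hy, List.foldl_cons]
      · -- state 1
        intro d acc nm
        by_cases hx : x = ""
        · subst hx
          rw [List.foldl_cons, varlistA.step_empty,
            List.takeWhile_cons_of_neg (by simp),
            List.dropWhile_cons_of_neg (by simp),
            varlistB.blocks_empty_cons, List.append_nil]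
          exact (ih xs hxs).1 (d.insert nm acc) nm
        · rw [List.foldl_cons, varlistA.step_append d nm acc x hx,
            (ih xs hxs).2 d (acc ++ [x]) nm,
            List.takeWhile_cons_of_pos (by simp [hx]),
            List.dropWhile_cons_of_pos (by simp [hx]),
            List.append_assoc, List.singleton_append]

-- ===== VERDICT (by name: the statement is the Claim_ definition above) =====
theorem varlist_spec : Claim_equal_varlist := by
  intro input _
  show varlist input = varlist_alt input
  unfold varlist varlist_alt
  rw [(varlist_main input.length input (le_refl _)).1 PySem.Dict.empty ""]
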